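-- pv_equiv track=rewrite | github.com/gueguet/codewars_solution | python/5kyu/double_cola.py | who_is_next
-- ===== SOURCE A (Python) =====
-- from collections import deque
--
-- def who_is_next(names, r):
--     # your code
--     queue = deque(names)
--
--     i = 1
--     while(i<r):
--         name = queue.popleft()
--         queue.append(name)
--         queue.append(name)
--         i += 1
--     return queue[0]
-- ===== SOURCE B (Python) =====
-- def who_is_next(names, r):
--     n = len(names)
--     while r > n:
--         r = (r - n + 1) // 2
--     return names[r - 1]
-- ===== Notes on version B (the rewrite author's own statement) =====
-- stated objective: faster
-- what changed: Replaces the O(r) deque simulation (pop front, append twice, r-1 times) with an O(log r) arithmetic reduction of the rank: while r > n, r = (r - n + 1)//2, then index the original list once.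
-- outside the precondition, e.g. on who_is_next(['a', 'b'], 0): A returns 'a', B returns 'b'
import Mathlib
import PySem

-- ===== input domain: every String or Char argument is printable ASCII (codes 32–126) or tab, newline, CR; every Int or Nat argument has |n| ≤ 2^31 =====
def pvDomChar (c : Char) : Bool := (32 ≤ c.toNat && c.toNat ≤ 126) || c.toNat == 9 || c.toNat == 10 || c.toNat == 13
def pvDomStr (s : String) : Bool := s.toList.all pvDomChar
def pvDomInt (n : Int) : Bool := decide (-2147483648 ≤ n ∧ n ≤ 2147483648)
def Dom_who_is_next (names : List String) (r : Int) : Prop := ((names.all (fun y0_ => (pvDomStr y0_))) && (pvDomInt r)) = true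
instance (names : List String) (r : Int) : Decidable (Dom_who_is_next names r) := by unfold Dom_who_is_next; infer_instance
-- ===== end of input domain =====

-- B replaces A's O(r) deque simulation by an O(log r) arithmetic reduction of the rank.


-- ===== PORT A =====
-- A's while loop: each iteration pops the front name and appends it twice; runs max(r-1,0) times.
-- The deque is ported as the standard two-list queue (front, back-reversed) so each popleft/append
-- is O(1) as in Python; on an empty queue Python's popleft raises IndexError (unreachable under
-- Pre_) and we return [] there.
def who_is_nextLoop : List String → List String → Nat → List String
  | f, b, 0 => f ++ b.reverse
  | [], b, k + 1 =>
      match b.reverse with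
      | [] => []
      | x :: xs => who_is_nextLoop xs [x, x] k
  | x :: xs, b, k + 1 => who_is_nextLoop xs (x :: x :: b) k

def who_is_next (names : List String) (r : Int) : String :=
  ((PySem.List.pyGet? (who_is_nextLoop names [] (r - 1).toNat) 0).getD "")

-- ===== PORT B =====
-- B's while loop: while r > n, r = (r - n + 1) // 2; fuel r.toNat makes the recursion total
-- (inside Pre_ the rank at least halves each step, so the fuel is never exhausted).
def who_is_next_altLoop (n : Int) : Int → Nat → Int
  | r, 0 => r
  | r, f + 1 => if n < r then who_is_next_altLoop n (PySem.Int.floordiv (r - n + 1) 2) f else r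

def who_is_next_alt (names : List String) (r : Int) : String :=
  ((PySem.List.pyGet? names (who_is_next_altLoop (names.length : Int) r r.toNat - 1)).getD "")

-- ===== PRECONDITION & SPEC =====
-- Pre_ excludes names = [] (A raises IndexError there) and nonpositive r, a degenerate rank on
-- which A's answer names[0] (leftover loop state) and B's Python negative-index behaviour are
-- both accidental and neither is the specified 'r-th person'.
def Pre_who_is_next (names : List String) (r : Int) : Prop := names ≠ [] ∧ 1 ≤ r
instance (names : List String) (r : Int) : Decidable (Pre_who_is_next names r) := by unfold Pre_who_is_next; infer_instance
def pvWitness_who_is_next : List String × Int := (["Sheldon", "Leonard", "Penny"], 5)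
def Spec_who_is_next (names : List String) (r : Int) (out : String) : Prop := out = who_is_next_alt names r
instance (names : List String) (r : Int) (out : String) : Decidable (Spec_who_is_next names r out) := by unfold Spec_who_is_next; infer_instance

-- ===== CLAIM (what is proved, stated in full; the proofs are below) =====
def Claim_equal_who_is_next : Prop := ∀ (names : List String) (r : Int), Dom_who_is_next names r → Pre_who_is_next names r → Spec_who_is_next names r (who_is_next names r)

-- ===== LEMMAS AND PROOFS =====

-- proof-only model of A's loop: the queue as one plain list
def loopM : List String → Nat → List String
  | q, 0 => q
  | [], _ + 1 => []
  | x :: xs, f + 1 => loopM (xs ++ [x, x]) f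

lemma loop_bridge : ∀ (k : Nat) (f b : List String),
    who_is_nextLoop f b k = loopM (f ++ b.reverse) k := by
  intro k
  induction k with
  | zero => intro f b; rfl
  | succ n ih =>
    intro f b
    match f with
    | [] =>
      show (match b.reverse with
            | [] => []
            | x :: xs => who_is_nextLoop xs [x, x] n) = loopM ([] ++ b.reverse) (n + 1)
      cases hb : b.reverse with
      | nil => simp [loopM]
      | cons x xs => simp [ih, loopM]
    | x :: xs =>
      show who_is_nextLoop xs (x :: x :: b) n = loopM ((x :: xs) ++ b.reverse) (n + 1)
      rw [ih]
      rw [show loopM ((x :: xs) ++ b.reverse) (n + 1) = loopM ((xs ++ b.reverse) ++ [x, x]) n from rfl]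
      simp [List.append_assoc]

-- proof-only model of B's reduction, on Nat
def redN (n r : Nat) : Nat :=
  if h : n < r ∧ 0 < n then redN n ((r - n + 1) / 2) else r
termination_by r
decreasing_by omega

lemma redN_bounds (n r : Nat) (hn : 0 < n) (hr : 0 < r) : 0 < redN n r ∧ redN n r ≤ n := by
  by_cases h : n < r
  · rw [redN, dif_pos ⟨h, hn⟩]
    exact redN_bounds n ((r - n + 1) / 2) hn (by omega)
  · rw [redN, dif_neg (by omega)]
    omega
termination_by r
decreasing_by omega

lemma loop_length (k : Nat) : ∀ (q : List String), q ≠ [] → (loopM q k).length = q.length + k := by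
  induction k with
  | zero => intro q _; simp [loopM]
  | succ f ih =>
    intro q hq
    match q with
    | x :: xs =>
      have := ih (xs ++ [x, x]) (by simp)
      simp [loopM, this]
      omega

lemma loop_ne_nil (k : Nat) (q : List String) (hq : q ≠ []) : loopM q k ≠ [] := by
  have h := loop_length k q hq
  have hp : 0 < q.length := List.length_pos_iff.mpr hq
  intro hc
  rw [hc] at h
  simp at h
  omega

lemma loop_consume : ∀ (xs ds : List String) (k : Nat),
    loopM (xs ++ ds) (xs.length + k) = loopM (ds ++ xs.flatMap (fun x => [x, x])) k := by
  intro xs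
  induction xs with
  | nil => intro ds k; simp
  | cons x xs ih =>
    intro ds k
    have h1 : (x :: xs).length + k = (xs.length + k) + 1 := by simp; omega
    rw [h1]
    show loopM (x :: (xs ++ ds)) ((xs.length + k) + 1) = _
    rw [show loopM (x :: (xs ++ ds)) ((xs.length + k) + 1)
          = loopM ((xs ++ ds) ++ [x, x]) (xs.length + k) from rfl]
    rw [List.append_assoc, ih (ds ++ [x, x]) k]
    simp [List.append_assoc]

lemma loop_zero (q : List String) : loopM q 0 = q := by
  cases q <;> rfl

lemma headD_append (a b : List String) (ha : a ≠ []) : ((a ++ b).headD "") = a.headD "" := by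
  cases a <;> simp_all

lemma dbl : ∀ (m : Nat) (q : List String), q ≠ [] →
    ((loopM (q.flatMap (fun x => [x, x])) m).headD "") = ((loopM q (m / 2)).headD "") := by
  intro m
  induction m using Nat.strong_induction_on with
  | _ m ih =>
    intro q hq
    match q with
    | x :: xs =>
      match m with
      | 0 => simp [loopM]
      | 1 => simp [loopM]
      | (m' + 2) =>
        have hstep : loopM ((x :: xs).flatMap (fun x => [x, x])) (m' + 2)
            = loopM ((xs ++ [x, x]).flatMap (fun x => [x, x])) m' := by
          show loopM (x :: x :: xs.flatMap (fun x => [x, x])) (m' + 2) = _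
          rw [show loopM (x :: x :: xs.flatMap (fun x => [x, x])) (m' + 2)
                = loopM ((x :: xs.flatMap (fun x => [x, x])) ++ [x, x]) (m' + 1) from rfl]
          rw [show loopM ((x :: xs.flatMap (fun x => [x, x])) ++ [x, x]) (m' + 1)
                = loopM ((xs.flatMap (fun x => [x, x]) ++ [x, x]) ++ [x, x]) m' from rfl]
          congr 1
          simp [List.append_assoc]
        rw [hstep, ih m' (by omega) (xs ++ [x, x]) (by simp)]
        have h2 : (m' + 2) / 2 = m' / 2 + 1 := by omega
        rw [h2]
        rfl

lemma main_lemma : ∀ (k : Nat) (q : List String), q ≠ [] →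
    ((loopM q k).headD "") = q.getD (redN q.length (k + 1) - 1) "" := by
  intro k
  induction k using Nat.strong_induction_on with
  | _ k ih =>
    intro q hq
    have hn : 0 < q.length := List.length_pos_iff.mpr hq
    by_cases hk : k < q.length
    · -- fewer steps than the queue length: the first k names are just rotated away
      rw [redN, dif_neg (by omega)]
      have hsplit : q = q.take k ++ q.drop k := (List.take_append_drop k q).symm
      have hlen : (q.take k).length = k := by simp; omega
      have heq : loopM q k = q.drop k ++ (q.take k).flatMap (fun x => [x, x]) := by
        have h0 := loop_consume (q.take k) (q.drop k) 0
        rw [hlen, Nat.add_zero] at h0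
        calc loopM q k = loopM (q.take k ++ q.drop k) k := by rw [← hsplit]
          _ = _ := by rw [h0, loop_zero]
      rw [heq]
      rw [headD_append _ _ (by
        intro hc
        have : (q.drop k).length = 0 := by rw [hc]; simp
        simp at this
        omega)]
      have hd : (q.drop k).headD "" = q.getD k "" := by
        rw [List.headD_eq_head?_getD, List.head?_drop, List.getD_eq_getElem?_getD]
      rw [hd]
      congr 1
    · -- at least q.length steps: consume the whole queue, double it, recurse
      have hm : k = q.length + (k - q.length) := by omega
      set m := k - q.length with hmdef
      have hc := loop_consume q [] m
      simp only [List.append_nil, List.nil_append] at hc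
      rw [hm, hc, dbl m q hq, ih (m / 2) (by omega) q hq]
      have harg : redN q.length (q.length + m + 1) = redN q.length (m / 2 + 1) := by
        rw [redN, dif_pos ⟨by omega, hn⟩]
        congr 1
        omega
      rw [harg]

lemma alt_loop_eq : ∀ (fuel : Nat) (n r : Int), 1 ≤ n → 1 ≤ r → r.toNat ≤ fuel →
    who_is_next_altLoop n r fuel = ((redN n.toNat r.toNat : Nat) : Int) := by
  intro fuel
  induction fuel with
  | zero => intro n r hn hr hf; omega
  | succ f ih =>
    intro n r hn hr hf
    by_cases h : n < r
    · rw [who_is_next_altLoop, if_pos h]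
      have ha : r - n + 1 = ((r.toNat - n.toNat + 1 : Nat) : Int) := by omega
      have hfd : PySem.Int.floordiv (r - n + 1) 2 = (((r.toNat - n.toNat + 1) / 2 : Nat) : Int) := by
        rw [ha]
        exact_mod_cast PySem.Int.floordiv_natCast (r.toNat - n.toNat + 1) 2
      rw [hfd, ih n _ hn (by omega) (by omega)]
      rw [show redN n.toNat r.toNat = redN n.toNat ((r.toNat - n.toNat + 1) / 2) from by
        rw [redN, dif_pos ⟨by omega, by omega⟩]]
      congr 1
    · rw [who_is_next_altLoop, if_neg h, redN, dif_neg (by omega)]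
      omega

-- ===== VERDICT (by name: the statement is the Claim_ definition above) =====
theorem who_is_next_spec : Claim_equal_who_is_next := by
  intro names r _ hpre
  obtain ⟨hne, hr⟩ := hpre
  unfold Spec_who_is_next who_is_next who_is_next_alt
  have hbr : who_is_nextLoop names [] (r - 1).toNat = loopM names (r - 1).toNat := by
    rw [loop_bridge]; simp
  rw [hbr]
  have hn : 0 < names.length := List.length_pos_iff.mpr hne
  -- B's loop value
  have hb := alt_loop_eq r.toNat (names.length : Int) r (by exact_mod_cast hn) hr (by omega)
  simp only [Int.toNat_natCast] at hb
  rw [hb]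
  set j := redN names.length r.toNat with hj
  have hjb := redN_bounds names.length r.toNat hn (by omega)
  rw [← hj] at hjb
  -- A's side via the main lemma
  have hk1 : (r - 1).toNat + 1 = r.toNat := by omega
  have hA := main_lemma (r - 1).toNat names hne
  rw [hk1, ← hj] at hA
  have hnn := loop_ne_nil (r - 1).toNat names hne
  have hAh : (PySem.List.pyGet? (loopM names (r - 1).toNat) 0).getD ""
      = (loopM names (r - 1).toNat).headD "" := by
    rw [PySem.List.pyGet?_zero, List.headD_eq_head?_getD]
    cases loopM names (r - 1).toNat <;> simp_all
  rw [hAh, hA]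
  -- B's index
  have hcast : (j : Int) - 1 = ((j - 1 : Nat) : Int) := by omega
  rw [hcast, PySem.List.pyGet?_natCast]
  rw [List.getD_eq_getElem?_getD]
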